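-- pv_equiv track=rewrite | github.com/AdityaJain1030/K4-free-graph-constructions | scripts/verify_p17_lift.py | _enumerate_symmetric_bitmasks
-- ===== SOURCE A (Python) =====
-- def _enumerate_symmetric_bitmasks(n: int):
--     """Yield every symmetric S ⊆ Z_n \\ {0} as a Python int bitmask.
--
--     Bit i is set iff i ∈ S. Ten-ish times faster than the frozenset
--     variant; consumers that only need symmetric comparison benefit.
--     """
--     pairs = [(k, n - k) for k in range(1, (n // 2) + (0 if n % 2 == 0 else 1))]
--     self_inv = [n // 2] if n % 2 == 0 else []
--     slot_masks = []
--     for a, b in pairs: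
--         slot_masks.append((1 << a) | (1 << b))
--     for s in self_inv:
--         slot_masks.append(1 << s)
--     n_slots = len(slot_masks)
--     for bits in range(1 << n_slots):
--         mask = 0
--         x = bits
--         i = 0
--         while x:
--             if x & 1:
--                 mask |= slot_masks[i]
--             x >>= 1
--             i += 1
--         yield mask
-- ===== SOURCE B (Python) =====
-- def _enumerate_symmetric_bitmasks(n: int):
--     """Yield every symmetric S ⊆ Z_n \\ {0} as a Python int bitmask.
--
--     Doubling construction: each slot doubles the list of already-built
--     masks, so no per-mask inner bit loop is needed.
--     """
--     half = n // 2
--     if n % 2 == 0: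
--         slot_masks = [(1 << k) | (1 << (n - k)) for k in range(1, half)] + [1 << half]
--     else:
--         slot_masks = [(1 << k) | (1 << (n - k)) for k in range(1, half + 1)]
--     out = [0]
--     for s in slot_masks:
--         out += [m | s for m in out]
--     yield from out
-- ===== Notes on version B (the rewrite author's own statement) =====
-- stated objective: alternative
-- what changed: Replaces A's per-mask inner bit-scan of the range counter with a doubling construction that extends the output list once per slot (out += [m | s for m in out]), preserving the exact enumeration order; it drops the O(S) inner loop per mask (measured 8.7x at n=16 by the probe) but both remain exponential in the slot count, so no speed label is claimed.
import Mathlib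
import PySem

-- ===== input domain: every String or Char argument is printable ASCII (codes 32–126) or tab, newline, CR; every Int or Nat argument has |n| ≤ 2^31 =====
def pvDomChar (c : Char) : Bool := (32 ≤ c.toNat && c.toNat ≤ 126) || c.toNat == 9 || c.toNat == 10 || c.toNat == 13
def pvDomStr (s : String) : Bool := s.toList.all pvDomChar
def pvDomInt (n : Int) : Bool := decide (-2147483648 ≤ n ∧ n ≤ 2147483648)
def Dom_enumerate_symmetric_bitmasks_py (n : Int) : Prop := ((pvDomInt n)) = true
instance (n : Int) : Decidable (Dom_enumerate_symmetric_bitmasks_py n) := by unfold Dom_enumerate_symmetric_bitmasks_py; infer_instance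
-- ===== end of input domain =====

-- B replaces A's per-mask inner bit-scan by a list-doubling construction (one pass per slot),
-- keeping the exact enumeration order; objective: alternative (measured quicker on the timing
-- run's small sizes, but both are exponential in the number of slots, so no speed is claimed).

-- ===== PORT A =====
-- A's inner while-loop: `while x: if x & 1: mask |= slot_masks[i]; x >>= 1; i += 1`.
-- x comes from `range(1 << n_slots)`, so it is a Nat here; x & 1 = x % 2, x >> 1 = x / 2 on Nat.
def pvInnerA (slots : List Int) (x i : Nat) (mask : Int) : Int :=
  if h : x = 0 then mask
  else pvInnerA slots (x / 2) (i + 1)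
        (if x % 2 = 1 then PySem.Int.bor mask (slots.getD i 0) else mask)
termination_by x
decreasing_by exact Nat.div_lt_self (Nat.pos_of_ne_zero h) (by omega)

-- Shift exponents are nonnegative on every input admitted by Pre_ (Python raises ValueError on a
-- negative shift count), so `.toNat` is exact there.
def enumerate_symmetric_bitmasks_py (n : Int) : List Int :=
  let pairs : List (Int × Int) :=
    (PySem.List.pyRange 1 (PySem.Int.floordiv n 2 + (if PySem.Int.mod n 2 = 0 then 0 else 1)) 1).map
      (fun k => (k, n - k))
  let self_inv : List Int := if PySem.Int.mod n 2 = 0 then [PySem.Int.floordiv n 2] else []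
  let slot_masks : List Int := []
  let slot_masks := pairs.foldl
    (fun sm ab => sm ++ [PySem.Int.bor ((1 : Int) <<< ab.1.toNat) ((1 : Int) <<< ab.2.toNat)]) slot_masks
  let slot_masks := self_inv.foldl (fun sm s => sm ++ [(1 : Int) <<< s.toNat]) slot_masks
  let n_slots := slot_masks.length
  (List.range (1 <<< n_slots)).map (fun bits => pvInnerA slot_masks bits 0 0)

-- ===== PORT B =====
def enumerate_symmetric_bitmasks_py_alt (n : Int) : List Int :=
  let half := PySem.Int.floordiv n 2
  let slot_masks : List Int :=
    if PySem.Int.mod n 2 = 0 then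
      ((PySem.List.pyRange 1 half 1).map
        (fun k => PySem.Int.bor ((1 : Int) <<< k.toNat) ((1 : Int) <<< (n - k).toNat)))
        ++ [(1 : Int) <<< half.toNat]
    else
      (PySem.List.pyRange 1 (half + 1) 1).map
        (fun k => PySem.Int.bor ((1 : Int) <<< k.toNat) ((1 : Int) <<< (n - k).toNat))
  slot_masks.foldl (fun out s => out ++ out.map (fun m => PySem.Int.bor m s)) [0]

-- ===== PRECONDITION & SPEC =====
-- Pre_ excludes exactly the negative even n, on which A raises ValueError ('negative shift count').
def Pre_enumerate_symmetric_bitmasks_py (n : Int) : Prop := 0 ≤ n ∨ PySem.Int.mod n 2 ≠ 0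
instance (n : Int) : Decidable (Pre_enumerate_symmetric_bitmasks_py n) := by
  unfold Pre_enumerate_symmetric_bitmasks_py; infer_instance
def pvWitness_enumerate_symmetric_bitmasks_py : Int := 6

def Spec_enumerate_symmetric_bitmasks_py (n : Int) (out : List Int) : Prop := out = enumerate_symmetric_bitmasks_py_alt n
instance (n : Int) (out : List Int) : Decidable (Spec_enumerate_symmetric_bitmasks_py n out) := by unfold Spec_enumerate_symmetric_bitmasks_py; infer_instance

-- ===== CLAIM (what is proved, stated in full; the proofs are below) =====
def Claim_equal_enumerate_symmetric_bitmasks_py : Prop := ∀ (n : Int), Dom_enumerate_symmetric_bitmasks_py n → Pre_enumerate_symmetric_bitmasks_py n → Spec_enumerate_symmetric_bitmasks_py n (enumerate_symmetric_bitmasks_py n)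

-- ===== LEMMAS AND PROOFS =====

theorem pvInnerA_zero (slots : List Int) (i : Nat) (m : Int) : pvInnerA slots 0 i m = m := by
  rw [pvInnerA]; simp

theorem pvInnerA_ne (slots : List Int) {x : Nat} (h : x ≠ 0) (i : Nat) (m : Int) :
    pvInnerA slots x i m =
      pvInnerA slots (x / 2) (i + 1)
        (if x % 2 = 1 then PySem.Int.bor m (slots.getD i 0) else m) := by
  rw [pvInnerA]; simp [h]

theorem pvInnerA_even (slots : List Int) (y i : Nat) (m : Int) :
    pvInnerA slots (2 * y) i m = pvInnerA slots y (i + 1) m := by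
  by_cases hy : y = 0
  · subst hy; simp [pvInnerA_zero]
  · rw [pvInnerA_ne slots (by omega) i m]
    have h1 : 2 * y / 2 = y := by omega
    have h2 : ¬ (2 * y % 2 = 1) := by omega
    rw [h1, if_neg h2]

theorem pvInnerA_odd (slots : List Int) (y i : Nat) (m : Int) :
    pvInnerA slots (2 * y + 1) i m =
      pvInnerA slots y (i + 1) (PySem.Int.bor m (slots.getD i 0)) := by
  rw [pvInnerA_ne slots (by omega) i m]
  have h1 : (2 * y + 1) / 2 = y := by omega
  have h2 : (2 * y + 1) % 2 = 1 := by omega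
  rw [h1, h2, if_pos rfl]

-- indices below ss.length never see the appended tail
theorem pvInnerA_append_ext : ∀ (k : Nat) (ss ts : List Int) (x i : Nat) (m : Int),
    x < 2 ^ k → i + k ≤ ss.length → pvInnerA (ss ++ ts) x i m = pvInnerA ss x i m := by
  intro k
  induction k with
  | zero =>
    intro ss ts x i m hx _
    have hx0 : x = 0 := by omega
    subst hx0; simp [pvInnerA_zero]
  | succ k ih =>
    intro ss ts x i m hx hi
    by_cases h0 : x = 0
    · subst h0; simp [pvInnerA_zero]
    · rw [pvInnerA_ne _ h0, pvInnerA_ne _ h0]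
      have hilt : i < ss.length := by omega
      have hget : (ss ++ ts).getD i 0 = ss.getD i 0 := by
        simp [List.getD_eq_getElem?_getD, List.getElem?_append_left hilt]
      rw [hget]
      have hpow : 2 ^ (k + 1) = 2 * 2 ^ k := by ring
      exact ih ss ts (x / 2) (i + 1) _ (by omega) (by omega)

-- adding the 2^k bit ORs in the slot that sits just past ss
theorem pvInnerA_append_top : ∀ (k : Nat) (ss : List Int) (s : Int) (x i : Nat) (m : Int),
    x < 2 ^ k → i + k = ss.length →
    pvInnerA (ss ++ [s]) (2 ^ k + x) i m = PySem.Int.bor (pvInnerA ss x i m) s := by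
  intro k
  induction k with
  | zero =>
    intro ss s x i m hx hi
    have hx0 : x = 0 := by omega
    subst hx0
    have h1 : 2 ^ 0 + 0 = 2 * 0 + 1 := by norm_num
    rw [h1, pvInnerA_odd, pvInnerA_zero, pvInnerA_zero]
    have hget : (ss ++ [s]).getD i 0 = s := by
      have hle : ss.length ≤ i := by omega
      have hi0 : i - ss.length = 0 := by omega
      simp [List.getD_eq_getElem?_getD, List.getElem?_append_right hle, hi0]
    rw [hget]
  | succ k ih =>
    intro ss s x i m hx hi
    have hpow : 2 ^ (k + 1) = 2 * 2 ^ k := by ring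
    rcases Nat.even_or_odd x with ⟨y, hy⟩ | ⟨y, hy⟩
    · have hx' : x = 2 * y := by omega
      subst hx'
      have h1 : 2 ^ (k + 1) + 2 * y = 2 * (2 ^ k + y) := by omega
      rw [h1, pvInnerA_even, pvInnerA_even]
      exact ih ss s y (i + 1) m (by omega) (by omega)
    · subst hy
      have h1 : 2 ^ (k + 1) + (2 * y + 1) = 2 * (2 ^ k + y) + 1 := by omega
      rw [h1, pvInnerA_odd, pvInnerA_odd]
      have hilt : i < ss.length := by omega
      have hget : (ss ++ [s]).getD i 0 = ss.getD i 0 := by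
        simp [List.getD_eq_getElem?_getD, List.getElem?_append_left hilt]
      rw [hget]
      exact ih ss s y (i + 1) _ (by omega) (by omega)

-- A's enumeration of all 2^S bit patterns equals B's list-doubling fold
theorem pvKey : ∀ (slots : List Int),
    (List.range (2 ^ slots.length)).map (fun bits => pvInnerA slots bits 0 0)
      = slots.foldl (fun out s => out ++ out.map (fun m => PySem.Int.bor m s)) [0] := by
  intro slots
  induction slots using List.reverseRecOn with
  | nil => simp [pvInnerA_zero]
  | append_singleton ss s ih =>
    have hlen : (ss ++ [s]).length = ss.length + 1 := by simp
    have h2 : 2 ^ (ss.length + 1) = 2 ^ ss.length + 2 ^ ss.length := by ring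
    rw [hlen, h2, List.range_add, List.map_append, List.map_map,
        List.foldl_append, List.foldl_cons, List.foldl_nil, ← ih]
    congr 1
    · exact List.map_congr_left (fun b hb =>
        pvInnerA_append_ext ss.length ss [s] b 0 0 (List.mem_range.mp hb) (by omega))
    · rw [List.map_map]
      exact List.map_congr_left (fun b hb => by
        have := pvInnerA_append_top ss.length ss s b 0 0 (List.mem_range.mp hb) (by omega)
        simpa using this)

-- `sm.append(v)` folded over a list is init ++ map
theorem pvFoldlPush {α : Type} (f : α → Int) :
    ∀ (l : List α) (init : List Int),
      l.foldl (fun sm x => sm ++ [f x]) init = init ++ l.map f := by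
  intro l
  induction l with
  | nil => intro init; simp
  | cons a l ih => intro init; simp [ih]

theorem pvShlMax (a k : Int) : a <<< (max k 0) = a <<< k.toNat := by
  rw [← Int.toNat_eq_max, Int.shiftLeft_natCast_right]

-- ===== VERDICT (by name: the statement is the Claim_ definition above) =====
theorem enumerate_symmetric_bitmasks_py_spec : Claim_equal_enumerate_symmetric_bitmasks_py := by
  intro n _ _
  unfold Spec_enumerate_symmetric_bitmasks_py
  unfold enumerate_symmetric_bitmasks_py enumerate_symmetric_bitmasks_py_alt
  simp only [pvFoldlPush, Nat.shiftLeft_eq, one_mul, List.nil_append, pvKey]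
  by_cases h : PySem.Int.mod n 2 = 0
  · have h2 : (2 : Int) ∣ n := (PySem.Int.mod_eq_zero_iff_dvd n 2).mp h
    simp [h2, List.map_map, Function.comp_def, List.foldl_append, pvShlMax]
  · have h2 : ¬ (2 : Int) ∣ n := fun hh => h ((PySem.Int.mod_eq_zero_iff_dvd n 2).mpr hh)
    simp [h2, List.map_map, Function.comp_def, pvShlMax]
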